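-- pv_equiv track=rewrite | github.com/IliaSitkin/Amesim_automation | gitHub_Version_1.py | find_nearest_points
-- ===== SOURCE A (Python) =====
-- def find_nearest_points(lst, x):
--     # Сортируем список по возрастанию
--     sorted_lst = sorted(lst)
--     # Используем бинарный поиск для нахождения ближайшего индекса слева и справа от заданной точки
--     lo = 0
--     hi = len(sorted_lst) - 1
--     while lo <= hi:
--         mid = (lo + hi) // 2
--         if x < sorted_lst[mid]:
--             hi = mid - 1
--         elif x > sorted_lst[mid]:
--             lo = mid + 1
--         else:
--             # Индекс заданной точки найден в списке
--             lo = hi = mid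
--             break
--
--     if lo == 0:
--         return (sorted_lst[lo], sorted_lst[lo+1])
--     elif hi == len(sorted_lst) - 1:
--         return (sorted_lst[hi-1], sorted_lst[hi])
--     elif sorted_lst[lo] == x:
--         return (sorted_lst[lo-1], sorted_lst[lo])
--     elif sorted_lst[hi] == x:
--         return (sorted_lst[hi], sorted_lst[hi+1])
--     else:
--         # Индекс ближайшей точки слева - hi, индекс ближайшей точки справа - lo
--         return (sorted_lst[hi], sorted_lst[lo])
-- ===== SOURCE B (Python) =====
-- def find_nearest_points(lst, x):
--     if len(lst) < 2:
--         raise ValueError("need at least two points")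
--     s = sorted(lst)
--     k = 0
--     for v in lst:
--         if v < x:
--             k += 1
--     c = min(max(k, 1), len(s) - 1)
--     return (s[c - 1], s[c])
-- ===== Notes on version B (the rewrite author's own statement) =====
-- stated objective: simpler
-- what changed: Replaces the binary-search loop plus five result branches by a single count of elements below x and a clamped index into the sorted list, returning (s[c-1], s[c]) with c = min(max(k,1), n-1).
-- outside the precondition, e.g. on find_nearest_points([5], 6): A returns (5, 5), B raises ValueError; on find_nearest_points([1, 2, 2, 2, 3], 2): A returns (2, 2), B returns (1, 2)
import Mathlib
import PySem

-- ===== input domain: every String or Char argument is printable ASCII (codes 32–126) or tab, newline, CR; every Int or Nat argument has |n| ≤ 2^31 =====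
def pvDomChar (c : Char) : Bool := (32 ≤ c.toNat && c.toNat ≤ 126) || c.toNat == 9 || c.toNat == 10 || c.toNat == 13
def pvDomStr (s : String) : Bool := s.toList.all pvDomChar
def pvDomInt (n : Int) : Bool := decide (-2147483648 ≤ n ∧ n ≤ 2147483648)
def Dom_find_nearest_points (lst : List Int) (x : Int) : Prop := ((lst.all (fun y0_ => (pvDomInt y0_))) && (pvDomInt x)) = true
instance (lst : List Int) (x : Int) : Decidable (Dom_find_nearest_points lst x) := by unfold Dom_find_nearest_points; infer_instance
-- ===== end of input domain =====

-- B replaces A's binary-search loop and five result branches by one count of the elements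
-- below x and a clamped index into the sorted list (objective: simpler).

-- ===== PORT A =====
-- the while-loop of A: state (lo, hi); fuel s.length + 1 is enough since hi - lo strictly
-- decreases while lo ≤ hi (proved in pvBsLoop_spec below)
def pvBsLoop (s : List Int) (x : Int) : Nat → Int → Int → Int × Int
  | 0, lo, hi => (lo, hi)
  | fuel + 1, lo, hi =>
    if lo ≤ hi then
      let mid := PySem.Int.floordiv (lo + hi) 2
      match PySem.List.pyGet? s mid with
      | none => (lo, hi)          -- IndexError (unreachable: mid is in range when lo ≤ hi)
      | some v =>
        if x < v then pvBsLoop s x fuel lo (mid - 1)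
        else if x > v then pvBsLoop s x fuel (mid + 1) hi
        else (mid, mid)           -- break with lo = hi = mid
    else (lo, hi)

-- literal port of A; a Python IndexError (empty or one-element input) is the [] result
def find_nearest_points (lst : List Int) (x : Int) : List Int :=
  let s := PySem.List.sorted lst (fun v => v) false
  let n : Int := (s.length : Int)
  let r := pvBsLoop s x (s.length + 1) 0 (n - 1)
  let lo := r.1
  let hi := r.2
  if lo = 0 then
    match PySem.List.pyGet? s lo, PySem.List.pyGet? s (lo + 1) with
    | some a, some b => [a, b]
    | _, _ => []
  else if hi = n - 1 then
    match PySem.List.pyGet? s (hi - 1), PySem.List.pyGet? s hi with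
    | some a, some b => [a, b]
    | _, _ => []
  else
    match PySem.List.pyGet? s lo, PySem.List.pyGet? s hi with
    | some vlo, some vhi =>
      if vlo = x then
        match PySem.List.pyGet? s (lo - 1) with
        | some a => [a, vlo]
        | none => []
      else if vhi = x then
        match PySem.List.pyGet? s (hi + 1) with
        | some b => [vhi, b]
        | none => []
      else [vhi, vlo]
    | _, _ => []

-- ===== PORT B =====
-- literal port of Source B; the ValueError on lists shorter than 2 is the [] result
def find_nearest_points_alt (lst : List Int) (x : Int) : List Int :=
  if lst.length < 2 then []
  else
    let s := PySem.List.sorted lst (fun v => v) false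
    let k : Int := lst.foldl (fun a v => if v < x then a + 1 else a) 0
    let c : Int := min (max k 1) ((s.length : Int) - 1)
    match PySem.List.pyGet? s (c - 1) with
    | none => []
    | some a =>
      match PySem.List.pyGet? s c with
      | none => []
      | some b => [a, b]

-- ===== PRECONDITION & SPEC =====
-- Pre_ excludes lists shorter than 2, on which A raises IndexError or (one element, x above
-- it) returns a negative-index-wraparound pair and B raises ValueError, and lists containing
-- x more than once, where the occurrence A's binary search lands on is accidental.
def Pre_find_nearest_points (lst : List Int) (x : Int) : Prop :=
  2 ≤ lst.length ∧ lst.count x ≤ 1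
instance (lst : List Int) (x : Int) : Decidable (Pre_find_nearest_points lst x) := by
  unfold Pre_find_nearest_points; infer_instance

def pvWitness_find_nearest_points : List Int × Int := ([1, 3], 2)

def Spec_find_nearest_points (lst : List Int) (x : Int) (out : List Int) : Prop := out = find_nearest_points_alt lst x
instance (lst : List Int) (x : Int) (out : List Int) : Decidable (Spec_find_nearest_points lst x out) := by unfold Spec_find_nearest_points; infer_instance

-- ===== CLAIM (what is proved, stated in full; the proofs are below) =====
def Claim_equal_find_nearest_points : Prop := ∀ (lst : List Int) (x : Int), Dom_find_nearest_points lst x → Pre_find_nearest_points lst x → Spec_find_nearest_points lst x (find_nearest_points lst x)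

-- ===== LEMMAS AND PROOFS =====

lemma pv_two_le_count {s : List Int} {x : Int} {i j : Nat} (hij : i < j) (hj : j < s.length)
    (hi' : s[i]'(by omega) = x) (hj' : s[j] = x) : 2 ≤ s.count x := by
  have hsplit : s = s.take j ++ s.drop j := (List.take_append_drop j s).symm
  have h1 : x ∈ s.take j := by
    have hlen : i < (s.take j).length := by simp [List.length_take]; omega
    have heq : (s.take j)[i] = s[i]'(by omega) := List.getElem_take
    have := List.getElem_mem hlen
    rwa [heq, hi'] at this
  have h2 : x ∈ s.drop j := by
    have hlen : 0 < (s.drop j).length := by simp [List.length_drop]; omega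
    have heq : (s.drop j)[0] = s[j + 0]'(by omega) := List.getElem_drop
    have := List.getElem_mem hlen
    rw [heq] at this
    simp at this
    rwa [hj'] at this
  have c1 : 0 < (s.take j).count x := List.count_pos_iff.mpr h1
  have c2 : 0 < (s.drop j).count x := List.count_pos_iff.mpr h2
  calc 2 ≤ (s.take j).count x + (s.drop j).count x := by omega
    _ = s.count x := by rw [← List.count_append, ← hsplit]

lemma pv_countP_threshold {s : List Int} {p : Int → Bool} {m : Nat} (hm : m ≤ s.length)
    (h : ∀ (i : Nat) (hi : i < s.length), (p s[i] = true ↔ i < m)) : s.countP p = m := by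
  have hsplit : s = s.take m ++ s.drop m := (List.take_append_drop m s).symm
  have h1 : (s.take m).countP p = (s.take m).length := by
    rw [List.countP_eq_length]
    intro a ha
    obtain ⟨i, hi, rfl⟩ := List.mem_iff_getElem.mp ha
    have hi' : i < m := by
      have := hi
      simp [List.length_take] at this
      omega
    have := List.getElem_take (xs := s) (i := i) (h := hi)
    rw [this]
    exact (h i (by omega)).mpr hi'
  have h2 : (s.drop m).countP p = 0 := by
    rw [List.countP_eq_zero]
    intro a ha
    obtain ⟨i, hi, rfl⟩ := List.mem_iff_getElem.mp ha
    have hi' : i < s.length - m := by simpa [List.length_drop] using hi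
    have := List.getElem_drop (xs := s) (i := m) (j := i) (h := hi)
    rw [this]
    intro hp
    have := (h (m + i) (by omega)).mp hp
    omega
  have : s.countP p = (s.take m).countP p + (s.drop m).countP p := by
    rw [← List.countP_append, ← hsplit]
  rw [this, h1, h2, List.length_take]
  omega

lemma pv_countP_at_hit {s : List Int} {x : Int} (hpair : s.Pairwise (· ≤ ·))
    (hcnt : s.count x ≤ 1) {m : Nat} (hm : m < s.length) (hx : s[m] = x) :
    s.countP (fun v => decide (v < x)) = m := by
  have hmono := List.pairwise_iff_getElem.mp hpair
  apply pv_countP_threshold (by omega)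
  intro i hi
  simp only [decide_eq_true_eq]
  constructor
  · intro hlt
    by_contra hge
    have him : m ≤ i := Nat.le_of_not_lt hge
    have h2 : x ≤ s[i] := by
      rcases Nat.eq_or_lt_of_le him with he | hl
      · rw [← hx]
        exact le_of_eq (by congr 1)
      · rw [← hx]
        exact hmono m i hm hi hl
    omega
  · intro hlt
    have hle : s[i] ≤ x := by
      rw [← hx]
      exact hmono i m (by omega) hm hlt
    rcases lt_or_eq_of_le hle with h | h
    · exact h
    · exact absurd (pv_two_le_count hlt hm h hx) (by omega)

lemma pv_exhaust {s : List Int} {x : Int} {lo hi : Int} (hlo : 0 ≤ lo)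
    (hhi : hi < (s.length : Int)) (heq : lo = hi + 1)
    (hinv1 : ∀ (i : Nat) (h : i < s.length), (i : Int) < lo → s[i] < x)
    (hinv2 : ∀ (i : Nat) (h : i < s.length), hi < (i : Int) → x < s[i]) :
    x ∉ s ∧ s.countP (fun v => decide (v < x)) = lo.toNat := by
  have hall : ∀ (i : Nat) (h : i < s.length), s[i] < x ↔ (i : Int) < lo := by
    intro i h
    constructor
    · intro hlt
      by_contra hge
      have : hi < (i : Int) := by omega
      have := hinv2 i h this
      omega
    · exact hinv1 i h
  constructor
  · intro hmem
    obtain ⟨i, h, rfl⟩ := List.mem_iff_getElem.mp hmem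
    by_cases hc : (i : Int) < lo
    · have := hinv1 i h hc
      omega
    · have := hinv2 i h (by omega)
      omega
  · apply pv_countP_threshold (by omega)
    intro i hi
    simp only [decide_eq_true_eq]
    rw [hall i hi]
    omega

lemma pvBsLoop_spec (s : List Int) (x : Int) (hpair : s.Pairwise (· ≤ ·))
    (hcnt : s.count x ≤ 1) (fuel : Nat) (lo hi : Int)
    (hlo : 0 ≤ lo) (hhi : hi < (s.length : Int)) (hlohi : lo ≤ hi + 1)
    (hfuel : hi + 1 - lo ≤ (fuel : Int))
    (hinv1 : ∀ (i : Nat) (h : i < s.length), (i : Int) < lo → s[i] < x)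
    (hinv2 : ∀ (i : Nat) (h : i < s.length), hi < (i : Int) → x < s[i]) :
    pvBsLoop s x fuel lo hi =
      (if x ∈ s then (((s.countP (fun v => decide (v < x)) : Nat) : Int),
                      ((s.countP (fun v => decide (v < x)) : Nat) : Int))
       else (((s.countP (fun v => decide (v < x)) : Nat) : Int),
             ((s.countP (fun v => decide (v < x)) : Nat) : Int) - 1)) := by
  have hmono := List.pairwise_iff_getElem.mp hpair
  induction fuel generalizing lo hi with
  | zero =>
    have heq : lo = hi + 1 := by omega
    obtain ⟨hnm, hcp⟩ := pv_exhaust hlo hhi heq hinv1 hinv2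
    rw [pvBsLoop, if_neg hnm, hcp]
    simp only [Prod.mk.injEq]; constructor <;> omega
  | succ fuel ih =>
    by_cases hle : lo ≤ hi
    · have hmid := PySem.Int.floordiv_two_mid_bounds hle
      set mid := PySem.Int.floordiv (lo + hi) 2 with hmiddef
      have hmid0 : 0 ≤ mid := by omega
      have hmidlen : mid < (s.length : Int) := by omega
      have hget : PySem.List.pyGet? s mid = some (s[mid.toNat]'(by omega)) :=
        PySem.List.pyGet?_eq_some_getElem s hmid0 hmidlen
      rw [pvBsLoop]
      simp only [if_pos hle, ← hmiddef, hget]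
      by_cases h1 : x < s[mid.toNat]'(by omega)
      · rw [if_pos h1]
        apply ih lo (mid - 1) hlo (by omega) (by omega) (by omega) hinv1
        intro i h hgt
        by_cases hc : hi < (i : Int)
        · exact hinv2 i h hc
        · have : mid.toNat ≤ i := by omega
          rcases Nat.eq_or_lt_of_le this with he | hl
          · have : s[mid.toNat]'(by omega) = s[i] := by congr 1
            omega
          · have := hmono mid.toNat i (by omega) h hl
            omega
      · rw [if_neg h1]
        by_cases h2 : x > s[mid.toNat]'(by omega)
        · rw [if_pos h2]
          apply ih (mid + 1) hi (by omega) hhi (by omega) (by omega)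
          · intro i h hltm
            by_cases hc : (i : Int) < lo
            · exact hinv1 i h hc
            · have : i ≤ mid.toNat := by omega
              rcases Nat.eq_or_lt_of_le this with he | hl
              · have : s[i] = s[mid.toNat]'(by omega) := by congr 1
                omega
              · have := hmono i mid.toNat h (by omega) hl
                omega
          · exact hinv2
        · rw [if_neg h2]
          have hx : s[mid.toNat]'(by omega) = x := by omega
          have hmem : x ∈ s := by
            rw [← hx]
            exact List.getElem_mem (by omega)
          rw [if_pos hmem, pv_countP_at_hit hpair hcnt (by omega) hx]
          simp only [Prod.mk.injEq]; constructor <;> omega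
    · have heq : lo = hi + 1 := by omega
      obtain ⟨hnm, hcp⟩ := pv_exhaust hlo hhi heq hinv1 hinv2
      rw [pvBsLoop, if_neg hle, if_neg hnm, hcp]
      simp only [Prod.mk.injEq]; constructor <;> omega

lemma pv_main (lst : List Int) (x : Int) (h2 : 2 ≤ lst.length) (hc1 : lst.count x ≤ 1) :
    find_nearest_points lst x = find_nearest_points_alt lst x := by
  have hperm := PySem.List.sorted_perm lst (fun v => v) false
  set s := PySem.List.sorted lst (fun v => v) false with hs
  have hlen : s.length = lst.length := hperm.length_eq
  have hpair : s.Pairwise (· ≤ ·) := PySem.List.sorted_pairwise lst (fun v => v)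
  have hcnt : s.count x ≤ 1 := by rw [hperm.count_eq]; exact hc1
  have hn : 2 ≤ s.length := by omega
  set K := s.countP (fun v => decide (v < x)) with hK
  have hKle : K ≤ s.length := List.countP_le_length
  have hloop := pvBsLoop_spec s x hpair hcnt (s.length + 1) 0 ((s.length : Int) - 1)
    (by omega) (by omega) (by omega) (by push_cast; omega)
    (by intro i h hlt; omega)
    (by intro i h hgt; exfalso; omega)
  have hfold : lst.foldl (fun a v => if v < x then a + 1 else a) 0 = (K : Int) := by
    have := PySem.List.foldl_if_add_one (fun v => decide (v < x)) lst 0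
    simp only [decide_eq_true_eq] at this
    rw [hK, hperm.countP_eq]
    simpa using this
  rw [find_nearest_points, find_nearest_points_alt]
  rw [if_neg (show ¬ lst.length < 2 by omega)]
  simp only [← hs, hfold, hloop]
  by_cases hx : x ∈ s
  · simp only [if_pos hx, ← hK]
    obtain ⟨m, hm, hmx⟩ := List.mem_iff_getElem.mp hx
    have hKm : K = m := by rw [hK]; exact pv_countP_at_hit hpair hcnt hm hmx
    have hKlt : K < s.length := by omega
    have hsK : s[K]'hKlt = x := by
      rw [← hmx]
      simp [hKm]
    by_cases hK0 : K = 0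
    · rw [if_pos (show ((K : Nat) : Int) = 0 by omega)]
      rw [PySem.List.pyGet?_eq_some_getElem s (i := ((K : Nat) : Int)) (by omega) (by omega),
          PySem.List.pyGet?_eq_some_getElem s (i := ((K : Nat) : Int) + 1) (by omega) (by omega)]
      have hc : min (max ((K : Nat) : Int) 1) ((s.length : Int) - 1) = 1 := by omega
      rw [hc,
          PySem.List.pyGet?_eq_some_getElem s (i := (1 : Int) - 1) (by omega) (by omega),
          PySem.List.pyGet?_eq_some_getElem s (i := (1 : Int)) (by omega) (by omega)]
      have e1 : (((K : Nat) : Int)).toNat = 0 := by omega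
      have e2 : (((K : Nat) : Int) + 1).toNat = 1 := by omega
      have e4 : ((1 : Int)).toNat = 1 := by omega
      simp [e1, e2, e4]
    · rw [if_neg (show ¬ ((K : Nat) : Int) = 0 by omega)]
      by_cases hKtop : K = s.length - 1
      · rw [if_pos (show ((K : Nat) : Int) = (s.length : Int) - 1 by omega)]
        rw [PySem.List.pyGet?_eq_some_getElem s (i := ((K : Nat) : Int) - 1) (by omega) (by omega),
            PySem.List.pyGet?_eq_some_getElem s (i := ((K : Nat) : Int)) (by omega) (by omega)]
        have hc : min (max ((K : Nat) : Int) 1) ((s.length : Int) - 1) = ((K : Nat) : Int) := by omega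
        rw [hc,
            PySem.List.pyGet?_eq_some_getElem s (i := ((K : Nat) : Int) - 1) (by omega) (by omega),
            PySem.List.pyGet?_eq_some_getElem s (i := ((K : Nat) : Int)) (by omega) (by omega)]
      · rw [if_neg (show ¬ ((K : Nat) : Int) = (s.length : Int) - 1 by omega)]
        rw [PySem.List.pyGet?_eq_some_getElem s (i := ((K : Nat) : Int)) (by omega) (by omega)]
        rw [PySem.List.pyGet?_eq_some_getElem s (i := ((K : Nat) : Int) - 1) (by omega) (by omega)]
        have hc : min (max ((K : Nat) : Int) 1) ((s.length : Int) - 1) = ((K : Nat) : Int) := by omega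
        rw [hc,
            PySem.List.pyGet?_eq_some_getElem s (i := ((K : Nat) : Int) - 1) (by omega) (by omega),
            PySem.List.pyGet?_eq_some_getElem s (i := ((K : Nat) : Int)) (by omega) (by omega)]
        simp [hsK]
  · simp only [if_neg hx, ← hK]
    have hne : ∀ (i : Nat) (h : i < s.length), s[i] ≠ x := by
      intro i h he
      exact hx (he ▸ List.getElem_mem h)
    by_cases hK0 : K = 0
    · rw [if_pos (show ((K : Nat) : Int) = 0 by omega)]
      rw [PySem.List.pyGet?_eq_some_getElem s (i := ((K : Nat) : Int)) (by omega) (by omega),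
          PySem.List.pyGet?_eq_some_getElem s (i := ((K : Nat) : Int) + 1) (by omega) (by omega)]
      have hc : min (max ((K : Nat) : Int) 1) ((s.length : Int) - 1) = 1 := by omega
      rw [hc,
          PySem.List.pyGet?_eq_some_getElem s (i := (1 : Int) - 1) (by omega) (by omega),
          PySem.List.pyGet?_eq_some_getElem s (i := (1 : Int)) (by omega) (by omega)]
      have e1 : (((K : Nat) : Int)).toNat = 0 := by omega
      have e2 : (((K : Nat) : Int) + 1).toNat = 1 := by omega
      have e4 : ((1 : Int)).toNat = 1 := by omega
      simp [e1, e2, e4]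
    · rw [if_neg (show ¬ ((K : Nat) : Int) = 0 by omega)]
      by_cases hKtop : K = s.length
      · rw [if_pos (show ((K : Nat) : Int) - 1 = (s.length : Int) - 1 by omega)]
        rw [PySem.List.pyGet?_eq_some_getElem s (i := ((K : Nat) : Int) - 1 - 1) (by omega) (by omega),
            PySem.List.pyGet?_eq_some_getElem s (i := ((K : Nat) : Int) - 1) (by omega) (by omega)]
        have hc : min (max ((K : Nat) : Int) 1) ((s.length : Int) - 1) = ((K : Nat) : Int) - 1 := by omega
        rw [hc,
            PySem.List.pyGet?_eq_some_getElem s (i := ((K : Nat) : Int) - 1 - 1) (by omega) (by omega),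
            PySem.List.pyGet?_eq_some_getElem s (i := ((K : Nat) : Int) - 1) (by omega) (by omega)]
      · have hKlt : K < s.length := by omega
        rw [if_neg (show ¬ ((K : Nat) : Int) - 1 = (s.length : Int) - 1 by omega)]
        rw [PySem.List.pyGet?_eq_some_getElem s (i := ((K : Nat) : Int)) (by omega) (by omega),
            PySem.List.pyGet?_eq_some_getElem s (i := ((K : Nat) : Int) - 1) (by omega) (by omega)]
        have hc : min (max ((K : Nat) : Int) 1) ((s.length : Int) - 1) = ((K : Nat) : Int) := by omega
        rw [hc,
            PySem.List.pyGet?_eq_some_getElem s (i := ((K : Nat) : Int) - 1) (by omega) (by omega),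
            PySem.List.pyGet?_eq_some_getElem s (i := ((K : Nat) : Int)) (by omega) (by omega)]
        have hx1 : s[((K : Nat) : Int).toNat]'(by omega) ≠ x := hne _ (by omega)
        have hx2 : s[(((K : Nat) : Int) - 1).toNat]'(by omega) ≠ x := hne _ (by omega)
        have hx1' : s[K]'(by omega) ≠ x := hne _ (by omega)
        have hx2' : s[K - 1]'(by omega) ≠ x := hne _ (by omega)
        simp [hx1', hx2']


-- ===== VERDICT (by name: the statement is the Claim_ definition above) =====
theorem find_nearest_points_spec : Claim_equal_find_nearest_points := by
  intro lst x _hdom hpre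
  unfold Spec_find_nearest_points
  exact pv_main lst x hpre.1 hpre.2
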